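-- pv_equiv track=rewrite | github.com/SadLaboka/ylab_tasks | ylab_tasks/lecture1.py | count_find_num
-- ===== SOURCE A (Python) =====
-- from math import prod
--
-- def count_find_num(primesL: list, limit: int) -> list:
--     """Searches for all possible options
--      for multiplying elements up to the limit and
--      returns the number of options and the maximum"""
--     min_number = prod(primesL)
--     result = set()
--     result.add(min_number)
--     if min_number > limit:
--         return []
--     old_values = {min_number}
--     while min_number <= limit:
--         new_values = set()
--         for i in old_values:
--             for n in primesL:
--                 mul = i * n
--                 new_values.add(mul)
--                 if mul <= limit:
--                     result.add(mul)
--         min_number = min(new_values)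
--         old_values = {i for i in new_values if i < limit}
--     return [len(result), max(result)]
-- ===== SOURCE B (Python) =====
-- def count_find_num(primesL: list, limit: int) -> list:
--     """Count & max of all products of the given factors up to the limit.
--     Recursive DFS over canonical non-decreasing factor choices: each node
--     multiplies by factors from the current suffix only, so combinations are
--     enumerated once per exponent pattern; results collected in one set."""
--     start = 1
--     for p in primesL:
--         start *= p
--     if start > limit:
--         return []
--     found = set()
--     def dfs(cur, ps):
--         found.add(cur)
--         for k in range(len(ps)):
--             nxt = cur * ps[k]
--             if nxt <= limit:
--                 dfs(nxt, ps[k:])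
--     dfs(start, primesL)
--     return [len(found), max(found)]
-- ===== Notes on version B (the rewrite author's own statement) =====
-- stated objective: alternative
-- what changed: A does level-synchronous re-expansion (a per-round set of all current products, re-deriving values, with min-of-level termination); B is a recursive depth-first enumeration over canonical non-decreasing factor choices -- each call may only multiply by factors from the current suffix of the list, so exponent patterns are generated once, collected into one set, with no levels, frontier or min computation.
-- outside the precondition, e.g. on count_find_num([-2], 3): A returns [1, -2], B returns [1, -2]
import Mathlib
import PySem

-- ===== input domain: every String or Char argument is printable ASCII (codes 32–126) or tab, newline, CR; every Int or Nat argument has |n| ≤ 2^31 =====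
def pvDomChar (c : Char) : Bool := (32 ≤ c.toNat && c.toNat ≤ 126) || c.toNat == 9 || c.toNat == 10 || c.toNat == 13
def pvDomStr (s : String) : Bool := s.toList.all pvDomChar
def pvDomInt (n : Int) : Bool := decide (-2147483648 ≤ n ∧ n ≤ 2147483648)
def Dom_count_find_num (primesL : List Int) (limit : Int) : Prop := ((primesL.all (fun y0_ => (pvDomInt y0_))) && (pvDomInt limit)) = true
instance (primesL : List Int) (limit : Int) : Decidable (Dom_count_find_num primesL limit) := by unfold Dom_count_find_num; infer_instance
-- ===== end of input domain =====

-- B replaces A's level-synchronous re-expansion (per-round set, min-of-level termination)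
-- by a recursive depth-first enumeration over canonical non-decreasing factor choices:
-- each call may only multiply by factors from the current suffix of the list
-- (objective: alternative).

-- ===== PORT A =====
-- math.prod(primesL)
def pvProdA (l : List Int) : Int := l.foldl (· * ·) 1

-- inner 'for n in primesL' body of A: state = (new_values, result)
def aInner (primesL : List Int) (limit : Int) (st : PySem.Set Int × PySem.Set Int) (i : Int) :
    PySem.Set Int × PySem.Set Int :=
  primesL.foldl (fun st n =>
    let mul := i * n
    (PySem.Set.add st.1 mul, if mul ≤ limit then PySem.Set.add st.2 mul else st.2)) st

-- the 'while min_number <= limit' loop; fuel-bounded (none = ValueError on min(∅) / fuel out,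
-- both outside Pre_); state = (min_number, old_values, result)
def aLoop (primesL : List Int) (limit : Int) :
    Nat → Int → PySem.Set Int → PySem.Set Int → Option (PySem.Set Int)
  | 0, _, _, _ => none
  | fuel+1, minNumber, oldValues, result =>
    if minNumber ≤ limit then
      let st := oldValues.foldl (aInner primesL limit) (PySem.Set.empty, result)
      match PySem.List.min? st.1 (fun x => x) with
      | none => none
      | some m' => aLoop primesL limit fuel m' (st.1.filter (fun i => decide (i < limit))) st.2
    else some result

def count_find_num (primesL : List Int) (limit : Int) : List Int :=
  let minNumber := pvProdA primesL
  let result := PySem.Set.add PySem.Set.empty minNumber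
  if minNumber > limit then []
  else
    match aLoop primesL limit ((limit - minNumber).toNat + 2) minNumber
        (PySem.Set.add PySem.Set.empty minNumber) result with
    | some res => [(res.length : Int), (PySem.List.max? res (fun x => x)).getD 0]
    | none => []

-- ===== PORT B =====
-- B's recursive dfs(cur, ps) (fuel-bounded; the fuel suffices on Pre_) together with its
-- inner 'for k in range(len(ps))' loop, which walks the non-empty suffixes ps[k:] of ps
mutual
def bDfs (limit : Int) (fuel : Nat) (cur : Int) (ps : List Int) (found : PySem.Set Int) :
    PySem.Set Int :=
  match fuel with
  | 0 => found
  | fuel' + 1 => bSuff limit fuel' cur ps (PySem.Set.add found cur)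
  termination_by (fuel, 0)

def bSuff (limit : Int) (fuel : Nat) (cur : Int) (ps : List Int) (found : PySem.Set Int) :
    PySem.Set Int :=
  match ps with
  | [] => found
  | p :: rest =>
      bSuff limit fuel cur rest
        (if cur * p ≤ limit then bDfs limit fuel (cur * p) (p :: rest) found else found)
  termination_by (fuel, ps.length + 1)
end

def count_find_num_alt (primesL : List Int) (limit : Int) : List Int :=
  let start := primesL.foldl (· * ·) 1
  if start > limit then []
  else
    let found := bDfs limit ((limit - start).toNat + 1) start primesL PySem.Set.empty
    [(found.length : Int), (PySem.List.max? found (fun x => x)).getD 0]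

-- ===== PRECONDITION & SPEC =====
-- min(primesL) (0 for the empty list; only used when primesL ≠ [])
def pvMinP (primesL : List Int) : Int := (PySem.List.min? primesL (fun x => x)).getD 0

-- Pre_ admits every input with prod(primesL) > limit (A returns [] at once) and otherwise
-- requires the natural domain: a nonempty list of factors ≥ 2 on which A does not hit its
-- ValueError (min() of an empty set, reached exactly when limit = prod·min(primesL)^k, k ≥ 1).
-- Excluded (one sentence): lists containing an entry < 2 with prod ≤ limit are excluded because
-- A there loops forever or raises ValueError on almost all of them, its accidental returns on a
-- few sign-flipping corners being artefacts of the escape test; and the ValueError inputs above.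
def Pre_count_find_num (primesL : List Int) (limit : Int) : Prop :=
  limit < primesL.foldl (· * ·) 1 ∨
  (primesL ≠ [] ∧ (∀ p ∈ primesL, 2 ≤ p) ∧
    ∀ k ∈ List.range 40, primesL.foldl (· * ·) 1 * (pvMinP primesL) ^ (k + 1) ≠ limit)
instance (primesL : List Int) (limit : Int) : Decidable (Pre_count_find_num primesL limit) := by
  unfold Pre_count_find_num; infer_instance

def pvWitness_count_find_num : List Int × Int := ([2, 3], 36)

def Spec_count_find_num (primesL : List Int) (limit : Int) (out : List Int) : Prop := out = count_find_num_alt primesL limit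
instance (primesL : List Int) (limit : Int) (out : List Int) : Decidable (Spec_count_find_num primesL limit out) := by unfold Spec_count_find_num; infer_instance

-- ===== CLAIM (what is proved, stated in full; the proofs are below) =====
def Claim_equal_count_find_num : Prop := ∀ (primesL : List Int) (limit : Int), Dom_count_find_num primesL limit → Pre_count_find_num primesL limit → Spec_count_find_num primesL limit (count_find_num primesL limit)

-- ===== LEMMAS AND PROOFS =====

-- the k-th multiplication level: all products of m0 with exactly k factors from P
def Lv (P : List Int) (m0 : Int) : Nat → List Int
  | 0 => [m0]
  | k+1 => (Lv P m0 k).flatMap (fun x => P.map (fun p => x * p))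

-- all products of m0 with factors from P
inductive Reach (P : List Int) (m0 : Int) : Int → Prop
  | base : Reach P m0 m0
  | step {x p : Int} : Reach P m0 x → p ∈ P → Reach P m0 (x * p)

-- canonical suffix-monotone derivations with all intermediate products ≤ limit
-- (exactly what B's dfs(cur, ps) enumerates)
inductive RB (limit : Int) : Int → List Int → Int → Prop
  | base (cur : Int) (ps : List Int) : RB limit cur ps cur
  | step {cur x p : Int} {ps rest : List Int} :
      (p :: rest) <:+ ps → cur * p ≤ limit → RB limit (cur * p) (p :: rest) x →
      RB limit cur ps x

-- ---- basic arithmetic facts ----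

theorem foldl_mul_le (P : List Int) : ∀ (init : Int), 1 ≤ init → (∀ p ∈ P, 2 ≤ p) →
    init ≤ P.foldl (· * ·) init := by
  induction P with
  | nil => intro init _ _; exact le_refl init
  | cons q Q ih =>
    intro init h1 h2
    have hq : 2 ≤ q := h2 q (by simp)
    have h1' : 1 ≤ init * q := by nlinarith
    have := ih (init * q) h1' (fun p hp => h2 p (by simp [hp]))
    calc init ≤ init * q := by nlinarith
    _ ≤ _ := by simpa using this

theorem prodA_two_le (P : List Int) (hne : P ≠ []) (h2 : ∀ p ∈ P, 2 ≤ p) :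
    2 ≤ pvProdA P := by
  cases P with
  | nil => exact absurd rfl hne
  | cons q Q =>
    have hq : 2 ≤ q := h2 q (by simp)
    have : q ≤ Q.foldl (· * ·) q := foldl_mul_le Q q (by omega) (fun p hp => h2 p (by simp [hp]))
    unfold pvProdA
    simp only [List.foldl_cons, one_mul]
    omega

theorem pvMinP_spec (P : List Int) (hne : P ≠ []) :
    pvMinP P ∈ P ∧ ∀ p ∈ P, pvMinP P ≤ p := by
  obtain ⟨v, hv⟩ : ∃ v, PySem.List.min? P (fun x => x) = some v := by
    cases h : PySem.List.min? P (fun x => x) with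
    | none => exact absurd ((PySem.List.min?_eq_none_iff P (fun x => x)).mp h) hne
    | some v => exact ⟨v, rfl⟩
  have hmem := PySem.List.min?_mem hv
  have hmin := PySem.List.min?_isMin hv
  unfold pvMinP
  rw [hv]
  exact ⟨hmem, hmin⟩

theorem prod_ge_one (l : List Int) (h : ∀ p ∈ l, 1 ≤ p) : 1 ≤ l.prod := by
  induction l with
  | nil => simp
  | cons q Q ih =>
    have hq := h q (by simp)
    have hQ := ih (fun p hp => h p (by simp [hp]))
    rw [List.prod_cons]
    nlinarith

-- ---- levels ----

theorem mem_Lv_succ (P : List Int) (m0 x : Int) (k : Nat) :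
    x ∈ Lv P m0 (k+1) ↔ ∃ y ∈ Lv P m0 k, ∃ p ∈ P, x = y * p := by
  simp only [Lv, List.mem_flatMap, List.mem_map]
  constructor
  · rintro ⟨y, hy, p, hp, rfl⟩; exact ⟨y, hy, p, hp, rfl⟩
  · rintro ⟨y, hy, p, hp, rfl⟩; exact ⟨y, hy, p, hp, rfl⟩

theorem Lv_lower (P : List Int) (m0 pmin : Int) (hm0 : 1 ≤ m0) (hpmin2 : 2 ≤ pmin)
    (hpm_min : ∀ p ∈ P, pmin ≤ p) (h2 : ∀ p ∈ P, 2 ≤ p) :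
    ∀ (k : Nat) (x : Int), x ∈ Lv P m0 k → m0 * pmin ^ k ≤ x ∧ 1 ≤ x := by
  intro k
  induction k with
  | zero => intro x hx; simp only [Lv, List.mem_singleton] at hx; subst hx; simpa using hm0
  | succ k ih =>
    intro x hx
    rw [mem_Lv_succ] at hx
    obtain ⟨y, hy, p, hp, rfl⟩ := hx
    obtain ⟨hyl, hy1⟩ := ih y hy
    have hp2 : 2 ≤ p := h2 p hp
    have hppm : pmin ≤ p := hpm_min p hp
    constructor
    · calc m0 * pmin ^ (k+1) = (m0 * pmin ^ k) * pmin := by ring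
      _ ≤ y * pmin := mul_le_mul_of_nonneg_right hyl (by omega)
      _ ≤ y * p := mul_le_mul_of_nonneg_left hppm (by omega)
    · nlinarith

theorem reach_iff_lv (P : List Int) (m0 x : Int) :
    Reach P m0 x ↔ ∃ k, x ∈ Lv P m0 k := by
  constructor
  · intro h
    induction h with
    | base => exact ⟨0, by simp [Lv]⟩
    | step hx hp ih =>
      obtain ⟨k, hk⟩ := ih
      exact ⟨k+1, (mem_Lv_succ _ _ _ _).mpr ⟨_, hk, _, hp, rfl⟩⟩
  · rintro ⟨k, hk⟩
    induction k generalizing x with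
    | zero => simp only [Lv, List.mem_singleton] at hk; subst hk; exact Reach.base
    | succ k ih =>
      rw [mem_Lv_succ] at hk
      obtain ⟨y, hy, p, hp, rfl⟩ := hk
      exact Reach.step (ih y hy) hp

-- ---- A's inner loops ----

theorem aInner_spec (limit i : Int) :
    ∀ (P : List Int) (st : PySem.Set Int × PySem.Set Int),
    st.1.Nodup → st.2.Nodup →
    (aInner P limit st i).1.Nodup ∧ (aInner P limit st i).2.Nodup ∧
    (∀ x, x ∈ (aInner P limit st i).1 ↔ x ∈ st.1 ∨ ∃ p ∈ P, x = i * p) ∧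
    (∀ x, x ∈ (aInner P limit st i).2 ↔ x ∈ st.2 ∨ ∃ p ∈ P, x = i * p ∧ x ≤ limit) := by
  intro P
  induction P with
  | nil => intro st h1 h2; simp [aInner, h1, h2]
  | cons q Q ih =>
    intro st h1 h2
    have hstep : aInner (q :: Q) limit st i =
        aInner Q limit (PySem.Set.add st.1 (i*q),
          if i*q ≤ limit then PySem.Set.add st.2 (i*q) else st.2) i := by
      simp [aInner]
    have hn1 : (PySem.Set.add st.1 (i*q)).Nodup := PySem.Set.nodup_add _ _ h1
    have hn2 : (if i*q ≤ limit then PySem.Set.add st.2 (i*q) else st.2).Nodup := by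
      split
      · exact PySem.Set.nodup_add _ _ h2
      · exact h2
    obtain ⟨a1, a2, a3, a4⟩ := ih (PySem.Set.add st.1 (i*q),
      if i*q ≤ limit then PySem.Set.add st.2 (i*q) else st.2) hn1 hn2
    rw [hstep]
    refine ⟨a1, a2, ?_, ?_⟩
    · intro x
      rw [a3 x]
      simp only [PySem.Set.mem_add, List.mem_cons]
      constructor
      · rintro (⟨h | h⟩ | ⟨p, hp, rfl⟩)
        · exact Or.inl h
        · exact Or.inr ⟨q, Or.inl rfl, h⟩
        · exact Or.inr ⟨p, Or.inr hp, rfl⟩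
      · rintro (h | ⟨p, (rfl | hp), rfl⟩)
        · exact Or.inl (Or.inl h)
        · exact Or.inl (Or.inr rfl)
        · exact Or.inr ⟨p, hp, rfl⟩
    · intro x
      rw [a4 x]
      by_cases hql : i*q ≤ limit
      · simp only [hql, if_true, PySem.Set.mem_add, List.mem_cons]
        constructor
        · rintro (⟨h | rfl⟩ | ⟨p, hp, rfl, hle⟩)
          · exact Or.inl h
          · exact Or.inr ⟨q, Or.inl rfl, rfl, hql⟩
          · exact Or.inr ⟨p, Or.inr hp, rfl, hle⟩
        · rintro (h | ⟨p, (rfl | hp), rfl, hle⟩)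
          · exact Or.inl (Or.inl h)
          · exact Or.inl (Or.inr rfl)
          · exact Or.inr ⟨p, hp, rfl, hle⟩
      · simp only [hql, if_false, List.mem_cons]
        constructor
        · rintro (h | ⟨p, hp, rfl, hle⟩)
          · exact Or.inl h
          · exact Or.inr ⟨p, Or.inr hp, rfl, hle⟩
        · rintro (h | ⟨p, (rfl | hp), rfl, hle⟩)
          · exact Or.inl h
          · exact absurd hle hql
          · exact Or.inr ⟨p, hp, rfl, hle⟩

theorem aStep_spec (P : List Int) (limit : Int) :
    ∀ (old : List Int) (st : PySem.Set Int × PySem.Set Int),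
    st.1.Nodup → st.2.Nodup →
    (old.foldl (aInner P limit) st).1.Nodup ∧ (old.foldl (aInner P limit) st).2.Nodup ∧
    (∀ x, x ∈ (old.foldl (aInner P limit) st).1 ↔
      x ∈ st.1 ∨ ∃ y ∈ old, ∃ p ∈ P, x = y * p) ∧
    (∀ x, x ∈ (old.foldl (aInner P limit) st).2 ↔
      x ∈ st.2 ∨ ∃ y ∈ old, ∃ p ∈ P, x = y * p ∧ x ≤ limit) := by
  intro old
  induction old with
  | nil => intro st h1 h2; simp [h1, h2]
  | cons v old ih =>
    intro st h1 h2
    obtain ⟨a1, a2, a3, a4⟩ := aInner_spec limit v P st h1 h2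
    obtain ⟨b1, b2, b3, b4⟩ := ih (aInner P limit st v) a1 a2
    simp only [List.foldl_cons]
    refine ⟨b1, b2, ?_, ?_⟩
    · intro x
      rw [b3 x, a3 x]
      simp only [List.mem_cons]
      constructor
      · rintro (⟨h | ⟨p, hp, rfl⟩⟩ | ⟨y, hy, p, hp, rfl⟩)
        · exact Or.inl h
        · exact Or.inr ⟨v, Or.inl rfl, p, hp, rfl⟩
        · exact Or.inr ⟨y, Or.inr hy, p, hp, rfl⟩
      · rintro (h | ⟨y, (rfl | hy), p, hp, rfl⟩)
        · exact Or.inl (Or.inl h)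
        · exact Or.inl (Or.inr ⟨p, hp, rfl⟩)
        · exact Or.inr ⟨y, hy, p, hp, rfl⟩
    · intro x
      rw [b4 x, a4 x]
      simp only [List.mem_cons]
      constructor
      · rintro (⟨h | ⟨p, hp, rfl, hle⟩⟩ | ⟨y, hy, p, hp, rfl, hle⟩)
        · exact Or.inl h
        · exact Or.inr ⟨v, Or.inl rfl, p, hp, rfl, hle⟩
        · exact Or.inr ⟨y, Or.inr hy, p, hp, rfl, hle⟩
      · rintro (h | ⟨y, (rfl | hy), p, hp, rfl, hle⟩)
        · exact Or.inl (Or.inl h)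
        · exact Or.inl (Or.inr ⟨p, hp, rfl, hle⟩)
        · exact Or.inr ⟨y, hy, p, hp, rfl, hle⟩

-- ---- A's while loop ----

theorem aLoop_correct (P : List Int) (limit m0 pmin : Int)
    (hm0 : 1 ≤ m0) (hpm_mem : pmin ∈ P) (hpm_min : ∀ p ∈ P, pmin ≤ p)
    (h2 : ∀ p ∈ P, 2 ≤ p)
    (hnc : ∀ k : Nat, m0 * pmin ^ (k + 1) ≠ limit) :
    ∀ (fuel k : Nat) (old res : PySem.Set Int),
    1 ≤ fuel →
    (m0 * pmin ^ k ≤ limit → (limit - m0 * pmin ^ k).toNat + 2 ≤ fuel) →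
    old.Nodup → res.Nodup →
    (∀ x ∈ old, x ∈ Lv P m0 k) →
    (∀ x ∈ Lv P m0 k, x < limit → x ∈ old) →
    (m0 * pmin ^ k ≤ limit → m0 * pmin ^ k ∈ old) →
    (∀ x, x ∈ res ↔ ∃ j ≤ k, x ∈ Lv P m0 j ∧ x ≤ limit) →
    ∃ out, aLoop P limit fuel (m0 * pmin ^ k) old res = some out ∧ out.Nodup ∧
      (∀ x, x ∈ out ↔ Reach P m0 x ∧ x ≤ limit) := by
  have hpmin2 : 2 ≤ pmin := h2 pmin hpm_mem
  intro fuel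
  induction fuel with
  | zero => intro k old res hfuel; omega
  | succ fuel ih =>
    intro k old res _ hfuel hnodupO hnodupR hOsub hOsup hOmin hres
    by_cases hguard : m0 * pmin ^ k ≤ limit
    · -- loop body runs
      obtain ⟨s1, s2, s3, s4⟩ := aStep_spec P limit old (PySem.Set.empty, res)
        (by simp [PySem.Set.empty]) hnodupR
      set st := old.foldl (aInner P limit) (PySem.Set.empty, res) with hst
      have hm1 : (1:Int) ≤ m0 * pmin ^ k := by
        have h1p : (1:Int) ≤ pmin ^ k := one_le_pow₀ (by omega)
        nlinarith
      -- the next minimum is in new_values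
      have hnextmem : m0 * pmin ^ (k+1) ∈ st.1 := by
        rw [s3]
        exact Or.inr ⟨m0 * pmin ^ k, hOmin hguard, pmin, hpm_mem, by ring⟩
      obtain ⟨v, hv⟩ : ∃ v, PySem.List.min? st.1 (fun x => x) = some v := by
        cases h : PySem.List.min? st.1 (fun x => x) with
        | none =>
          rw [PySem.List.min?_eq_none_iff] at h
          rw [h] at hnextmem
          exact absurd hnextmem (List.not_mem_nil)
        | some v => exact ⟨v, rfl⟩
      -- the minimum is exactly m0 * pmin^(k+1)
      have hvval : v = m0 * pmin ^ (k+1) := by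
        have hle : v ≤ m0 * pmin ^ (k+1) := PySem.List.min?_isMin hv _ hnextmem
        have hmemv : v ∈ st.1 := PySem.List.min?_mem hv
        rw [s3] at hmemv
        rcases hmemv with h | ⟨y, hy, p, hp, rfl⟩
        · simp [PySem.Set.empty] at h
        · have hyL := hOsub y hy
          have hylow := (Lv_lower P m0 pmin hm0 hpmin2 hpm_min h2 k y hyL)
          have : m0 * pmin ^ (k+1) ≤ y * p := by
            calc m0 * pmin ^ (k+1) = (m0 * pmin ^ k) * pmin := by ring
            _ ≤ y * pmin := mul_le_mul_of_nonneg_right hylow.1 (by omega)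
            _ ≤ y * p := mul_le_mul_of_nonneg_left (hpm_min p hp) (by omega)
          omega
      subst hvval
      -- step the loop
      have hunfold : aLoop P limit (fuel+1) (m0 * pmin ^ k) old res =
          aLoop P limit fuel (m0 * pmin ^ (k+1))
            (st.1.filter (fun i => decide (i < limit))) st.2 := by
        simp only [aLoop, if_pos hguard, ← hst, hv]
      rw [hunfold]
      -- fuel decreases
      have hstep1 : m0 * pmin ^ k + 1 ≤ m0 * pmin ^ (k+1) := by
        have : m0 * pmin ^ (k+1) = (m0 * pmin ^ k) * pmin := by ring
        nlinarith
      -- apply IH at level k+1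
      have hfb := hfuel hguard
      have hfuel1 : 1 ≤ fuel := by omega
      have hfuel' : m0 * pmin ^ (k+1) ≤ limit →
          (limit - m0 * pmin ^ (k+1)).toNat + 2 ≤ fuel := by
        intro hB'
        generalize hA : m0 * pmin ^ k = A at hfb hguard hstep1
        generalize hB : m0 * pmin ^ (k+1) = B at hstep1 hB' ⊢
        omega
      apply ih (k+1) (st.1.filter (fun i => decide (i < limit))) st.2
      · exact hfuel1
      · exact hfuel'
      · exact s1.filter _
      · exact s2
      · intro x hx
        rw [List.mem_filter] at hx
        have := (s3 x).mp hx.1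
        rcases this with h | ⟨y, hy, p, hp, rfl⟩
        · simp [PySem.Set.empty] at h
        · exact (mem_Lv_succ P m0 _ k).mpr ⟨y, hOsub y hy, p, hp, rfl⟩
      · intro x hx hxlt
        rw [mem_Lv_succ] at hx
        obtain ⟨y, hy, p, hp, rfl⟩ := hx
        have hylow := Lv_lower P m0 pmin hm0 hpmin2 hpm_min h2 k y hy
        have hylt : y < y * p := by nlinarith [h2 p hp, hylow.2]
        rw [List.mem_filter]
        constructor
        · rw [s3]
          exact Or.inr ⟨y, hOsup y hy (by omega), p, hp, rfl⟩
        · simpa using hxlt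
      · intro hle
        have hne := hnc k
        rw [List.mem_filter]
        refine ⟨hnextmem, by simp; omega⟩
      · intro x
        rw [s4 x]
        constructor
        · rintro (h | ⟨y, hy, p, hp, rfl, hle⟩)
          · obtain ⟨j, hj, hmem, hle⟩ := (hres x).mp h
            exact ⟨j, by omega, hmem, hle⟩
          · exact ⟨k+1, le_rfl, (mem_Lv_succ P m0 _ k).mpr ⟨y, hOsub y hy, p, hp, rfl⟩, hle⟩
        · rintro ⟨j, hj, hmem, hle⟩
          rcases Nat.lt_or_ge j (k+1) with hjk | hjk
          · exact Or.inl ((hres x).mpr ⟨j, by omega, hmem, hle⟩)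
          · have hj' : j = k + 1 := by omega
            subst hj'
            rw [mem_Lv_succ] at hmem
            obtain ⟨y, hy, p, hp, rfl⟩ := hmem
            have hylow := Lv_lower P m0 pmin hm0 hpmin2 hpm_min h2 k y hy
            have hylt : y < y * p := by nlinarith [h2 p hp, hylow.2]
            exact Or.inr ⟨y, hOsup y hy (by omega), p, hp, rfl, hle⟩
    · -- loop exits: result is res
      refine ⟨res, by simp only [aLoop, if_neg hguard], hnodupR, ?_⟩
      intro x
      rw [hres x]
      constructor
      · rintro ⟨j, hj, hmem, hle⟩
        exact ⟨(reach_iff_lv P m0 x).mpr ⟨j, hmem⟩, hle⟩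
      · rintro ⟨hr, hle⟩
        obtain ⟨j, hj⟩ := (reach_iff_lv P m0 x).mp hr
        refine ⟨j, ?_, hj, hle⟩
        by_contra hjk
        have hjk' : k ≤ j := by omega
        have hlow := (Lv_lower P m0 pmin hm0 hpmin2 hpm_min h2 j x hj).1
        have hpow : pmin ^ k ≤ pmin ^ j := pow_le_pow_right₀ (by omega) hjk'
        have : m0 * pmin ^ k ≤ m0 * pmin ^ j :=
          mul_le_mul_of_nonneg_left hpow (by omega)
        omega

-- ---- the Reach relation ----

theorem reach_mono (P P' : List Int) (m x : Int) (hsub : ∀ q ∈ P', q ∈ P)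
    (h : Reach P' m x) : Reach P m x := by
  induction h with
  | base => exact Reach.base
  | step hx hp ih => exact Reach.step ih (hsub _ hp)

theorem reach_trans (P : List Int) (a b c : Int) (h1 : Reach P a b) (h2 : Reach P b c) :
    Reach P a c := by
  induction h2 with
  | base => exact h1
  | step hx hp ih => exact Reach.step ih hp

theorem reach_exists_list (P : List Int) (m x : Int) (h : Reach P m x) :
    ∃ l : List Int, (∀ p ∈ l, p ∈ P) ∧ x = m * l.prod := by
  induction h with
  | base => exact ⟨[], by simp⟩
  | @step x p hx hp ih =>
    obtain ⟨l, hl, rfl⟩ := ih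
    refine ⟨l ++ [p], ?_, ?_⟩
    · intro q hq
      rcases List.mem_append.mp hq with h | h
      · exact hl q h
      · simp at h; subst h; assumption
    · rw [List.prod_append, List.prod_singleton]; ring

-- ---- the RB relation (what B's dfs enumerates) ----

theorem RB_mono (limit c x : Int) (Q ps : List Int) (hsuf : Q <:+ ps)
    (h : RB limit c Q x) : RB limit c ps x := by
  induction h with
  | base => exact RB.base _ _
  | step hs hle hrb ih => exact RB.step (hs.trans hsuf) hle hrb

theorem RB_iff (limit cur : Int) (ps : List Int) (x : Int) :
    RB limit cur ps x ↔ x = cur ∨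
      ∃ p rest, (p :: rest) <:+ ps ∧ cur * p ≤ limit ∧ RB limit (cur * p) (p :: rest) x := by
  constructor
  · intro h
    cases h with
    | base => exact Or.inl rfl
    | step hs hle hrb => exact Or.inr ⟨_, _, hs, hle, hrb⟩
  · rintro (rfl | ⟨p, rest, hs, hle, hrb⟩)
    · exact RB.base _ _
    · exact RB.step hs hle hrb

theorem RB_to_reach (limit : Int) : ∀ {c : Int} {ps : List Int} {x : Int},
    RB limit c ps x → c ≤ limit → Reach ps c x ∧ x ≤ limit := by
  intro c ps x h
  induction h with
  | base => intro hc; exact ⟨Reach.base, hc⟩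
  | @step cur x p ps' rest hs hle hrb ih =>
    intro _
    obtain ⟨hr, hxle⟩ := ih hle
    refine ⟨?_, hxle⟩
    have hstep : Reach ps' cur (cur * p) := Reach.step Reach.base (hs.subset (by simp))
    exact reach_trans _ _ _ _ hstep (reach_mono _ _ _ _ (fun q hq => hs.subset hq) hr)

theorem list_to_RB (limit : Int) : ∀ (ps l : List Int) (c : Int),
    (∀ p ∈ ps, 2 ≤ p) → 1 ≤ c → (∀ p ∈ l, p ∈ ps) → c * l.prod ≤ limit →
    RB limit c ps (c * l.prod) := by
  intro ps
  induction ps with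
  | nil =>
    intro l c _ _ hmem _
    cases l with
    | nil => simpa using RB.base c ([] : List Int)
    | cons a t => exact absurd (hmem a (by simp)) (List.not_mem_nil)
  | cons q Q ih =>
    intro l c h2 hc hmem hle
    have hq2 : 2 ≤ q := h2 q (by simp)
    set n := l.count q with hn
    set l' := l.filter (fun x => !(x == q)) with hl'
    have hperm : List.Perm (l.filter (fun x => x == q) ++ l') l :=
      List.filter_append_perm _ l
    have hfeq : l.filter (fun x => x == q) = List.replicate n q := by
      rw [hn]; exact List.filter_beq q
    have hprod : l.prod = q ^ n * l'.prod := by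
      rw [← hperm.prod_eq, List.prod_append, hfeq, List.prod_replicate]
    have hl'mem : ∀ p ∈ l', p ∈ Q := by
      intro p hp
      rw [hl', List.mem_filter] at hp
      have h1 := hmem p hp.1
      have h2' : p ≠ q := by simpa using hp.2
      simp only [List.mem_cons] at h1
      tauto
    have hl'ge : (1:Int) ≤ l'.prod := by
      apply prod_ge_one
      intro p hp
      have := h2 p (by simp [hl'mem p hp])
      omega
    -- peel off the n copies of q, staying on the full suffix q :: Q
    have aux : ∀ (m : Nat) (c : Int), 1 ≤ c → c * (q ^ m * l'.prod) ≤ limit →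
        RB limit c (q :: Q) (c * (q ^ m * l'.prod)) := by
      intro m
      induction m with
      | zero =>
        intro c hc hle'
        simp only [pow_zero, one_mul] at hle' ⊢
        exact RB_mono limit c _ Q (q :: Q) (List.suffix_cons q Q)
          (ih l' c (fun p hp => h2 p (by simp [hp])) hc hl'mem hle')
      | succ m ihm =>
        intro c hc hle'
        have hpow : (1:Int) ≤ q ^ m := one_le_pow₀ (by omega)
        have hkey : c * (q ^ (m+1) * l'.prod) = (c * q) * (q ^ m * l'.prod) := by ring
        have hcq1 : 1 ≤ c * q := by nlinarith
        have h1 : (1:Int) ≤ q ^ m * l'.prod := by nlinarith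
        have hcq : c * q ≤ limit := by
          calc c * q = c * q * 1 := by ring
          _ ≤ c * q * (q ^ m * l'.prod) := by nlinarith
          _ = c * (q ^ (m+1) * l'.prod) := by ring
          _ ≤ limit := hle'
        rw [hkey]
        exact RB.step (List.suffix_refl (q :: Q)) hcq
          (ihm (c * q) hcq1 (by rw [← hkey]; exact hle'))
    rw [hprod]
    exact aux n c hc (by rw [← hprod]; exact hle)

theorem reach_to_RB (limit : Int) (ps : List Int) (c x : Int)
    (h2 : ∀ p ∈ ps, 2 ≤ p) (hc : 1 ≤ c) (hr : Reach ps c x) (hx : x ≤ limit) :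
    RB limit c ps x := by
  obtain ⟨l, hl, rfl⟩ := reach_exists_list ps c x hr
  exact list_to_RB limit ps l c h2 hc hl hx

-- ---- B's dfs ----

theorem bSuff_spec (limit : Int) (fuel : Nat)
    (hdfs : ∀ (cur : Int) (ps : List Int) (found : PySem.Set Int),
      found.Nodup → 1 ≤ cur → (∀ p ∈ ps, 2 ≤ p) → (limit - cur).toNat + 1 ≤ fuel →
      (bDfs limit fuel cur ps found).Nodup ∧
      (∀ x, x ∈ bDfs limit fuel cur ps found ↔ x ∈ found ∨ RB limit cur ps x)) :
    ∀ (qs : List Int) (cur : Int) (found : PySem.Set Int),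
    found.Nodup → 1 ≤ cur → (∀ p ∈ qs, 2 ≤ p) → (limit - cur).toNat ≤ fuel →
    (bSuff limit fuel cur qs found).Nodup ∧
    (∀ x, x ∈ bSuff limit fuel cur qs found ↔
      x ∈ found ∨ ∃ p rest, (p :: rest) <:+ qs ∧ cur * p ≤ limit ∧
        RB limit (cur * p) (p :: rest) x) := by
  intro qs
  induction qs with
  | nil =>
    intro cur found hnd _ _ _
    have he : bSuff limit fuel cur [] found = found := by simp [bSuff]
    rw [he]
    refine ⟨hnd, ?_⟩
    intro x
    constructor
    · exact fun h => Or.inl h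
    · rintro (h | ⟨p, rest, hs, _, _⟩)
      · exact h
      · exact absurd (List.suffix_nil.mp hs) (by simp)
  | cons q rest ih =>
    intro cur found hnd hcur h2 hfuel
    have hq2 : 2 ≤ q := h2 q (by simp)
    have hstep : bSuff limit fuel cur (q :: rest) found =
        bSuff limit fuel cur rest
          (if cur * q ≤ limit then bDfs limit fuel (cur * q) (q :: rest) found else found) := by
      simp [bSuff]
    set found' := if cur * q ≤ limit then bDfs limit fuel (cur * q) (q :: rest) found else found
      with hfd
    have hfound' : found'.Nodup ∧
        (∀ x, x ∈ found' ↔ x ∈ found ∨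
          (cur * q ≤ limit ∧ RB limit (cur * q) (q :: rest) x)) := by
      by_cases hg : cur * q ≤ limit
      · have hcq1 : 1 ≤ cur * q := by nlinarith
        have hcqstep : cur + 1 ≤ cur * q := by nlinarith
        have hfuel' : (limit - cur * q).toNat + 1 ≤ fuel := by omega
        obtain ⟨d1, d2⟩ := hdfs (cur * q) (q :: rest) found hnd hcq1 h2 hfuel'
        rw [hfd, if_pos hg]
        refine ⟨d1, ?_⟩
        intro x
        rw [d2 x]
        tauto
      · rw [hfd, if_neg hg]
        refine ⟨hnd, ?_⟩
        intro x
        tauto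
    obtain ⟨hnd', hmem'⟩ := hfound'
    obtain ⟨b1, b2⟩ := ih cur found' hnd' hcur (fun p hp => h2 p (by simp [hp])) hfuel
    rw [hstep]
    refine ⟨b1, ?_⟩
    intro x
    rw [b2 x, hmem' x]
    constructor
    · rintro ((h | ⟨hg, hrb⟩) | ⟨p, r, hs, hle, hrb⟩)
      · exact Or.inl h
      · exact Or.inr ⟨q, rest, List.suffix_refl _, hg, hrb⟩
      · exact Or.inr ⟨p, r, hs.trans (List.suffix_cons q rest), hle, hrb⟩
    · rintro (h | ⟨p, r, hs, hle, hrb⟩)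
      · exact Or.inl (Or.inl h)
      · rcases List.suffix_cons_iff.mp hs with heq | hs'
        · obtain ⟨rfl, rfl⟩ : p = q ∧ r = rest := by
            injection heq with h1 h2; exact ⟨h1, h2⟩
          exact Or.inl (Or.inr ⟨hle, hrb⟩)
        · exact Or.inr ⟨p, r, hs', hle, hrb⟩

theorem bDfs_spec (limit : Int) : ∀ (fuel : Nat) (cur : Int) (ps : List Int)
    (found : PySem.Set Int),
    found.Nodup → 1 ≤ cur → (∀ p ∈ ps, 2 ≤ p) → (limit - cur).toNat + 1 ≤ fuel →
    (bDfs limit fuel cur ps found).Nodup ∧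
    (∀ x, x ∈ bDfs limit fuel cur ps found ↔ x ∈ found ∨ RB limit cur ps x) := by
  intro fuel
  induction fuel with
  | zero => intro cur ps found _ _ _ hfuel; omega
  | succ fuel ihf =>
    intro cur ps found hnd hcur h2 hfuel
    have hstep : bDfs limit (fuel + 1) cur ps found =
        bSuff limit fuel cur ps (PySem.Set.add found cur) := by
      simp [bDfs]
    obtain ⟨s1, s2⟩ := bSuff_spec limit fuel (fun c p f => ihf c p f) ps cur
      (PySem.Set.add found cur) (PySem.Set.nodup_add _ _ hnd) hcur h2 (by omega)
    rw [hstep]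
    refine ⟨s1, ?_⟩
    intro x
    rw [s2 x, PySem.Set.mem_add, RB_iff]
    tauto

-- ---- assembling the final results ----

theorem outputs_eq (outA outB : List Int) (S : Int → Prop) (m0 : Int)
    (hA : outA.Nodup) (hB : outB.Nodup)
    (hAm : ∀ x, x ∈ outA ↔ S x) (hBm : ∀ x, x ∈ outB ↔ S x) (hm0 : S m0) :
    ([(outA.length : Int), (PySem.List.max? outA (fun x => x)).getD 0] : List Int) =
      [(outB.length : Int), (PySem.List.max? outB (fun x => x)).getD 0] := by
  have hmem : ∀ x, x ∈ outA ↔ x ∈ outB := fun x => by rw [hAm, hBm]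
  have hperm : outA.Perm outB := (List.perm_ext_iff_of_nodup hA hB).mpr hmem
  obtain ⟨a, ha⟩ : ∃ a, PySem.List.max? outA (fun x => x) = some a := by
    cases h : PySem.List.max? outA (fun x => x) with
    | none =>
      rw [PySem.List.max?_eq_none_iff] at h
      have := (hAm m0).mpr hm0
      rw [h] at this
      exact absurd this (List.not_mem_nil)
    | some a => exact ⟨a, rfl⟩
  obtain ⟨b, hb⟩ : ∃ b, PySem.List.max? outB (fun x => x) = some b := by
    cases h : PySem.List.max? outB (fun x => x) with
    | none =>
      rw [PySem.List.max?_eq_none_iff] at h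
      have := (hBm m0).mpr hm0
      rw [h] at this
      exact absurd this (List.not_mem_nil)
    | some b => exact ⟨b, rfl⟩
  have hab : a = b := by
    have ha' : a ∈ outB := (hmem a).mp (PySem.List.max?_mem ha)
    have hb' : b ∈ outA := (hmem b).mpr (PySem.List.max?_mem hb)
    have h1 : a ≤ b := PySem.List.max?_isMax hb a ha'
    have h2 : b ≤ a := PySem.List.max?_isMax ha b hb'
    omega
  rw [ha, hb, hperm.length_eq, hab]

-- ===== VERDICT =====
theorem count_find_num_spec : Claim_equal_count_find_num := by
  unfold Claim_equal_count_find_num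
  intro P limit hdom hpre
  unfold Spec_count_find_num
  by_cases hgt : pvProdA P > limit
  · -- the product already exceeds the limit: both return []
    have hgt' : P.foldl (· * ·) 1 > limit := hgt
    simp [count_find_num, count_find_num_alt, hgt, hgt']
  · -- main case
    have hle : pvProdA P ≤ limit := by omega
    rcases hpre with h | ⟨hne, h2, hnc40⟩
    · exact absurd (show pvProdA P > limit from h) hgt
    have hm02 : 2 ≤ pvProdA P := prodA_two_le P hne h2
    obtain ⟨hpm_mem, hpm_min⟩ := pvMinP_spec P hne
    have hpmin2 : 2 ≤ pvMinP P := h2 _ hpm_mem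
    have hlimB : limit ≤ 2147483648 := by
      simp only [Dom_count_find_num, Bool.and_eq_true, pvDomInt, decide_eq_true_eq] at hdom
      exact hdom.2.2
    have hnc : ∀ k : Nat, pvProdA P * pvMinP P ^ (k + 1) ≠ limit := by
      intro k
      by_cases hk : k < 40
      · exact hnc40 k (List.mem_range.mpr hk)
      · have hp1 : (2:Int) ^ (k+1) ≤ pvMinP P ^ (k+1) :=
          pow_le_pow_left₀ (by norm_num) hpmin2 _
        have hp2 : (2:Int) ^ 41 ≤ (2:Int) ^ (k+1) :=
          pow_le_pow_right₀ (by norm_num) (by omega)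
        have hp3 : (2147483648:Int) < 2 ^ 41 := by norm_num
        have hp4 : pvMinP P ^ (k+1) ≤ pvProdA P * pvMinP P ^ (k+1) :=
          le_mul_of_one_le_left (by positivity) (by omega)
        omega
    have hadd : PySem.Set.add (PySem.Set.empty : PySem.Set Int) (pvProdA P) = [pvProdA P] := by
      rw [PySem.Set.add_of_not_mem (by simp [PySem.Set.empty])]
      rfl
    -- run A's loop
    obtain ⟨out, hout, houtnd, houtmem⟩ := aLoop_correct P limit (pvProdA P) (pvMinP P)
      (by omega) hpm_mem hpm_min h2 hnc ((limit - pvProdA P).toNat + 2) 0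
      [pvProdA P] [pvProdA P]
      (by omega)
      (by simp only [pow_zero, mul_one]; omega)
      (by simp) (by simp)
      (by simp [Lv])
      (by simp [Lv])
      (by simp only [pow_zero, mul_one]; intro _; simp)
      (by
        intro x
        simp only [List.mem_singleton]
        constructor
        · rintro rfl
          exact ⟨0, le_rfl, by simp [Lv], hle⟩
        · rintro ⟨j, hj, hmem, _⟩
          interval_cases j
          simpa [Lv] using hmem)
    simp only [pow_zero, mul_one] at hout
    -- run B's dfs
    obtain ⟨bnd, bmem⟩ := bDfs_spec limit ((limit - pvProdA P).toNat + 1) (pvProdA P) P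
      PySem.Set.empty (by simp [PySem.Set.empty]) (by omega) h2 (by omega)
    have bmem' : ∀ x, x ∈ bDfs limit ((limit - pvProdA P).toNat + 1) (pvProdA P) P
        PySem.Set.empty ↔ Reach P (pvProdA P) x ∧ x ≤ limit := by
      intro x
      rw [bmem x]
      constructor
      · rintro (h | h)
        · simp [PySem.Set.empty] at h
        · exact RB_to_reach limit h hle
      · rintro ⟨hr, hxle⟩
        exact Or.inr (reach_to_RB limit P (pvProdA P) x h2 (by omega) hr hxle)
    -- evaluate both ports
    have hA : count_find_num P limit =
        [(out.length : Int), (PySem.List.max? out (fun x => x)).getD 0] := by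
      unfold count_find_num
      simp only [if_neg hgt, hadd, hout]
    have hB : count_find_num_alt P limit =
        [((bDfs limit ((limit - pvProdA P).toNat + 1) (pvProdA P) P
            PySem.Set.empty).length : Int),
          (PySem.List.max? (bDfs limit ((limit - pvProdA P).toNat + 1) (pvProdA P) P
            PySem.Set.empty) (fun x => x)).getD 0] := by
      unfold count_find_num_alt
      rw [show List.foldl (fun x1 x2 => x1 * x2) 1 P = pvProdA P from rfl]
      simp only [if_neg hgt]
    rw [hA, hB]
    exact outputs_eq out _ (fun x => Reach P (pvProdA P) x ∧ x ≤ limit) (pvProdA P)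
      houtnd bnd houtmem bmem' ⟨Reach.base, hle⟩
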